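-- pv_equiv track=rewrite | github.com/taogoldi/analysis_data | mirai_mar_2026/scripts/extract_command_dispatch.py | guess_handler_symbol
-- ===== SOURCE A (Python) =====
-- def guess_handler_symbol(token: str, sym_names: set[str]) -> str | None:
--     token_l = token.lower()
--     candidates = []
--     for name in sym_names:
--         lname = name.lower()
--         if token_l in lname and (
--             lname.startswith("method_")
--             or lname.endswith("_worker")
--             or "flood" in lname
--             or "attack" in lname
--             or "udp" in lname
--             or "tcp" in lname
--         ):
--             candidates.append(name)
--     if not candidates:
--         return None
--     return sorted(candidates, key=lambda x: (len(x), x))[0]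
-- ===== SOURCE B (Python) =====
-- def _matches(token_l: str, lname: str) -> bool:
--     return token_l in lname and (
--         lname.startswith("method_")
--         or lname.endswith("_worker")
--         or "flood" in lname
--         or "attack" in lname
--         or "udp" in lname
--         or "tcp" in lname
--     )
--
--
-- def guess_handler_symbol(token: str, sym_names: set[str]) -> str | None:
--     token_l = token.lower()
--     best = None
--     for name in sym_names:
--         lname = name.lower()
--         if _matches(token_l, lname):
--             if best is None or (len(name), name) < (len(best), best):
--                 best = name
--     return best
-- ===== Notes on version B (the rewrite author's own statement) =====
-- stated objective: simpler
-- what changed: Replaced A's collect-all-candidates-then-sort-and-take-first with a single streaming pass that keeps the running minimum under the same key (len(name), name), so no candidates list and no sort are built.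
import Mathlib
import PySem

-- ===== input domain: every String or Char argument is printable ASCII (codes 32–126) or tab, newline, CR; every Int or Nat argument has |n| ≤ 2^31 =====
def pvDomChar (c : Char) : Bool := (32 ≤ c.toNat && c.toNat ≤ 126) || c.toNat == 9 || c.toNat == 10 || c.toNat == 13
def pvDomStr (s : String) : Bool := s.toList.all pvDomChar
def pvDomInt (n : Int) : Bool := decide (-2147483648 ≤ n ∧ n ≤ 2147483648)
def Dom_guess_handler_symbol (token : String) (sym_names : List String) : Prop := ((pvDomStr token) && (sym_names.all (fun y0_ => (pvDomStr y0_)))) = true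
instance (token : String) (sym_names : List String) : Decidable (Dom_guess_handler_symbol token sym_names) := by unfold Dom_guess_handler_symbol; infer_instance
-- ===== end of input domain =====

-- B replaces A's collect-all-candidates-then-sort-and-take-first with a single-pass
-- running minimum under the same key (len(name), name); objective: simpler (and no sort).

-- ===== PORT A =====
-- Literal port of A: build the candidates list, then sort by the tuple key (len, name)
-- and take the first element (none if no candidate).
def guess_handler_symbol (token : String) (sym_names : List String) : Option String :=
  let token_l := PySem.Str.lower token
  let candidates := sym_names.foldl (fun acc name =>
    let lname := PySem.Str.lower name
    if (PySem.Str.isIn token_l lname &&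
        (PySem.Str.startswith lname "method_" || PySem.Str.endswith lname "_worker" ||
         PySem.Str.isIn "flood" lname || PySem.Str.isIn "attack" lname ||
         PySem.Str.isIn "udp" lname || PySem.Str.isIn "tcp" lname)) = true
    then acc ++ [name] else acc) []
  if candidates = [] then none
  else (PySem.List.sorted2 candidates (fun x => PySem.Str.len x) (fun x => x)).head?

-- ===== PORT B =====
-- the shared filter of Source B (_matches): token containment plus the dispatch-name shape test
def pvMatches (token_l lname : String) : Bool :=
  PySem.Str.isIn token_l lname &&
    (PySem.Str.startswith lname "method_" || PySem.Str.endswith lname "_worker" ||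
     PySem.Str.isIn "flood" lname || PySem.Str.isIn "attack" lname ||
     PySem.Str.isIn "udp" lname || PySem.Str.isIn "tcp" lname)

-- Literal port of B: one pass keeping the running best; the Python tuple comparison
-- (len(name), name) < (len(best), best) is transcribed as its lexicographic meaning
-- (exact: Python compares 2-tuples left to right, and str '<' is code-point order,
-- which is String '<' on this domain).
def guess_handler_symbol_alt (token : String) (sym_names : List String) : Option String :=
  let token_l := PySem.Str.lower token
  sym_names.foldl (fun best name =>
    let lname := PySem.Str.lower name
    if pvMatches token_l lname then
      match best with
      | none => some name
      | some b =>
          if (decide (PySem.Str.len name < PySem.Str.len b) ||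
              (decide (PySem.Str.len name = PySem.Str.len b) && decide (name < b))) = true
          then some name else some b
    else best) none

-- ===== PRECONDITION & SPEC =====
def Spec_guess_handler_symbol (token : String) (sym_names : List String) (out : Option String) : Prop := out = guess_handler_symbol_alt token sym_names
instance (token : String) (sym_names : List String) (out : Option String) : Decidable (Spec_guess_handler_symbol token sym_names out) := by unfold Spec_guess_handler_symbol; infer_instance

-- ===== CLAIM (what is proved, stated in full; the proofs are below) =====
def Claim_equal_guess_handler_symbol : Prop := ∀ (token : String) (sym_names : List String), Dom_guess_handler_symbol token sym_names → Spec_guess_handler_symbol token sym_names (guess_handler_symbol token sym_names)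

-- ===== LEMMAS AND PROOFS =====

-- the sort/minimum key of both programs, packaged as a single linearly ordered key
def pvKey (x : String) : Lex (Int × String) := toLex (PySem.Str.len x, x)

theorem pvKey_injective : Function.Injective pvKey := by
  intro a b h
  have := congrArg (fun k => (ofLex k).2) h
  simpa [pvKey] using this

theorem pvKey_lt_iff (a b : String) :
    pvKey a < pvKey b ↔
      PySem.Str.len a < PySem.Str.len b ∨
        (PySem.Str.len a = PySem.Str.len b ∧ a < b) := by
  simp [pvKey, Prod.Lex.toLex_lt_toLex]

-- sorted2 with keys (len, id) is sorted with the packaged lex key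
theorem sorted2_eq_sorted_pvKey (cs : List String) :
    PySem.List.sorted2 cs (fun x => PySem.Str.len x) (fun x => x) =
      PySem.List.sorted cs pvKey := by
  rw [PySem.List.sorted_eq_foldl_insertBy]
  show List.foldl (fun acc x =>
      PySem.List.insertBy (fun a b =>
        decide (PySem.Str.len a < PySem.Str.len b) ||
          (!decide (PySem.Str.len b < PySem.Str.len a) && decide (a < b))) x acc) [] cs = _
  have hfun : (fun (a b : String) =>
      decide (PySem.Str.len a < PySem.Str.len b) ||
        (!decide (PySem.Str.len b < PySem.Str.len a) && decide (a < b))) =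
      fun a b => decide (pvKey a < pvKey b) := by
    funext a b
    rw [Bool.eq_iff_iff]
    simp only [Bool.or_eq_true, Bool.and_eq_true, Bool.not_eq_eq_eq_not, Bool.not_true,
      decide_eq_true_eq, decide_eq_false_iff_not, pvKey_lt_iff]
    constructor
    · rintro (h | ⟨h1, h2⟩)
      · exact Or.inl h
      · rcases lt_trichotomy (PySem.Str.len a) (PySem.Str.len b) with h' | h' | h'
        · exact Or.inl h'
        · exact Or.inr ⟨h', h2⟩
        · exact absurd h' h1
    · rintro (h | ⟨h1, h2⟩)
      · exact Or.inl h
      · exact Or.inr ⟨by omega, h2⟩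
  rw [hfun]

-- B's comparison boolean is exactly 'pvKey name < pvKey b'
theorem blex_eq (a b : String) :
    (decide (PySem.Str.len a < PySem.Str.len b) ||
      (decide (PySem.Str.len a = PySem.Str.len b) && decide (a < b))) =
      decide (pvKey a < pvKey b) := by
  rw [Bool.eq_iff_iff]
  simp [pvKey_lt_iff]

-- the running-minimum fold of port B (after filtering), named for the proofs below
def pvStep (best : Option String) (name : String) : Option String :=
  match best with
  | none => some name
  | some b =>
      if (decide (PySem.Str.len name < PySem.Str.len b) ||
          (decide (PySem.Str.len name = PySem.Str.len b) && decide (name < b))) = true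
      then some name else some b

-- invariant of the running minimum: the result is a member whose key is minimal
theorem foldl_pvStep_min (cs : List String) (b : String) :
    ∃ m, cs.foldl pvStep (some b) = some m ∧ m ∈ b :: cs ∧
      ∀ y ∈ b :: cs, pvKey m ≤ pvKey y := by
  induction cs generalizing b with
  | nil => exact ⟨b, rfl, by simp, by simp⟩
  | cons c cs ih =>
    show ∃ m, cs.foldl pvStep (pvStep (some b) c) = some m ∧ _
    by_cases h : pvKey c < pvKey b
    · have hdec : (decide (PySem.Str.len c < PySem.Str.len b) ||
          (decide (PySem.Str.len c = PySem.Str.len b) && decide (c < b))) = true := by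
        rw [blex_eq]; exact decide_eq_true h
      have hstep : pvStep (some b) c = some c := by
        simp only [pvStep, hdec, if_true]
      rw [hstep]
      obtain ⟨m, hm, hmem, hmin⟩ := ih c
      refine ⟨m, hm, ?_, ?_⟩
      · rcases List.mem_cons.1 hmem with rfl | h'
        · simp
        · simp [h']
      · intro y hy
        rcases List.mem_cons.1 hy with rfl | hy'
        · exact le_trans (hmin c (by simp)) (le_of_lt h)
        · rcases List.mem_cons.1 hy' with rfl | hy''
          · exact hmin y (by simp)
          · exact hmin y (by simp [hy''])
    · have hdec : (decide (PySem.Str.len c < PySem.Str.len b) ||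
          (decide (PySem.Str.len c = PySem.Str.len b) && decide (c < b))) = false := by
        rw [blex_eq]; exact decide_eq_false h
      have hstep : pvStep (some b) c = some b := by
        simp only [pvStep, hdec, Bool.false_eq_true, if_false]
      rw [hstep]
      obtain ⟨m, hm, hmem, hmin⟩ := ih b
      refine ⟨m, hm, ?_, ?_⟩
      · rcases List.mem_cons.1 hmem with rfl | h'
        · simp
        · simp [h']
      · intro y hy
        rcases List.mem_cons.1 hy with rfl | hy'
        · exact hmin y (by simp)
        · rcases List.mem_cons.1 hy' with rfl | hy''
          · exact le_trans (hmin b (by simp)) (not_lt.1 h)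
          · exact hmin y (by simp [hy''])

-- ===== VERDICT (by name: the statement is the Claim_ definition above) =====
theorem guess_handler_symbol_spec : Claim_equal_guess_handler_symbol := by
  intro token sym_names _
  unfold Spec_guess_handler_symbol guess_handler_symbol guess_handler_symbol_alt
  simp only []
  set token_l := PySem.Str.lower token with htl
  set p : String → Bool := fun name => pvMatches token_l (PySem.Str.lower name) with hp
  -- A's candidates list is the filter of sym_names by p
  have hA : sym_names.foldl (fun acc name =>
      let lname := PySem.Str.lower name
      if (PySem.Str.isIn token_l lname &&
          (PySem.Str.startswith lname "method_" || PySem.Str.endswith lname "_worker" ||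
           PySem.Str.isIn "flood" lname || PySem.Str.isIn "attack" lname ||
           PySem.Str.isIn "udp" lname || PySem.Str.isIn "tcp" lname)) = true
      then acc ++ [name] else acc) [] = sym_names.filter p := by
    have := PySem.List.foldl_append_if (l := sym_names) (p := p) (f := fun x => x) (acc := [])
    simpa [hp, pvMatches, List.map_id'] using this
  rw [hA]
  -- B's fold is the running minimum over the same filtered list
  have hB : sym_names.foldl (fun best name =>
      let lname := PySem.Str.lower name
      if pvMatches token_l lname then pvStep best name else best) none =
      (sym_names.filter p).foldl pvStep none := by
    rw [List.foldl_filter]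
  have hBshape : (sym_names.foldl (fun best name =>
      let lname := PySem.Str.lower name
      if pvMatches token_l lname then
        match best with
        | none => some name
        | some b =>
            if (decide (PySem.Str.len name < PySem.Str.len b) ||
                (decide (PySem.Str.len name = PySem.Str.len b) && decide (name < b))) = true
            then some name else some b
      else best) none) =
      (sym_names.filter p).foldl pvStep none := hB
  rw [hBshape]
  -- now compare head-of-sorted with the running minimum on cs = filter p sym_names
  set cs := sym_names.filter p with hcs
  clear_value cs
  clear hcs hA hB hBshape
  cases cs with
  | nil => simp
  | cons c rest =>
    have hne : (c :: rest : List String) ≠ [] := List.cons_ne_nil c rest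
    rw [if_neg hne, sorted2_eq_sorted_pvKey]
    -- B side: running minimum
    have hfold : (c :: rest).foldl pvStep none = rest.foldl pvStep (some c) := rfl
    obtain ⟨m, hm, hmem, hmin⟩ := foldl_pvStep_min rest c
    rw [hfold, hm]
    -- A side: head of the sorted list
    cases hs : PySem.List.sorted (c :: rest) pvKey with
    | nil => exact absurd ((PySem.List.sorted_eq_nil_iff _ pvKey false).1 hs) hne
    | cons h t =>
      have hhead : ∀ y ∈ c :: rest, pvKey h ≤ pvKey y :=
        PySem.List.key_head_sorted_le (c :: rest) pvKey hs
      have hhm : h ∈ c :: rest := by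
        have : h ∈ PySem.List.sorted (c :: rest) pvKey := by rw [hs]; simp
        exact (PySem.List.mem_sorted (c :: rest) pvKey false h).1 this
      have : pvKey h = pvKey m :=
        le_antisymm (hhead m hmem) (hmin h hhm)
      simp [pvKey_injective this]
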